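-- pv_equiv track=rewrite | github.com/AJAkil/Leetcode-Solve | doordash/extra/dashmart_distance.py | find_dashmart_distances
-- ===== SOURCE A (Python) =====
-- from collections import deque
-- from typing import List, Tuple
--
-- def find_dashmart_distances(city: List[List[str]], locations: List[List[int]]) -> List[int]:
--     """
--     Part 1: Find distance from each location to nearest DashMart.
--
--     Args:
--         city: 2D grid with 'D' (DashMart), ' ' (open), 'X' (blocked)
--         locations: List of [row, col] coordinates to query
--
--     Returns:
--         List of distances (-1 if unreachable or out of bounds)
--
--     Example:
--         city = [['D', ' ', 'X'],
--                 [' ', ' ', ' '],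
--                 ['X', ' ', 'D']]
--         locations = [[1, 1], [0, 2], [5, 5]]
--         Output: [1, -1, -1]  (distance 1, blocked, out of bounds)
--     """
--     if not city or not city[0]:
--         return [-1] * len(locations)
--
--     rows, cols = len(city), len(city[0])
--
--     # Distance grid: -1 = unvisited/blocked, 0 = DashMart, n = distance
--     distance = [[-1] * cols for _ in range(rows)]
--     queue = deque()
--
--     # Step 1: Initialize - find all DashMarts and add to queue
--     for r in range(rows):
--         for c in range(cols):
--             if city[r][c] == 'D':
--                 distance[r][c] = 0
--                 queue.append((r, c, 0))  # (row, col, dist)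
--             elif city[r][c] == 'X':
--                 distance[r][c] = -1  # Mark blocked as -1
--
--     # Step 2: Multi-source BFS from all DashMarts
--     directions = [(0, 1), (1, 0), (0, -1), (-1, 0)]
--
--     while queue:
--         r, c, dist = queue.popleft()
--
--         for dr, dc in directions:
--             nr, nc = r + dr, c + dc
--
--             # Check bounds and if cell is unvisited (distance == -1 but not blocked)
--             if 0 <= nr < rows and 0 <= nc < cols:
--                 # Only visit if it's open road and not yet visited
--                 if city[nr][nc] != 'X' and distance[nr][nc] == -1:
--                     distance[nr][nc] = dist + 1
--                     queue.append((nr, nc, dist + 1))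
--
--     # Step 3: Query the given locations
--     result = []
--     for row, col in locations:
--         # Check if location is out of bounds
--         if 0 <= row < rows and 0 <= col < cols:
--             result.append(distance[row][col])
--         else:
--             result.append(-1)  # Out of bounds
--
--     return result
-- ===== SOURCE B (Python) =====
-- def find_dashmart_distances(city, locations):
--     if not city or not city[0]:
--         return [-1] * len(locations)
--     rows, cols = len(city), len(city[0])
--
--     def nearest(r, c):
--         if not (0 <= r < rows and 0 <= c < cols) or city[r][c] == 'X':
--             return -1
--         visited = {(r, c)}
--         frontier = [(r, c)]
--         depth = 0
--         while frontier:
--             if any(city[fr][fc] == 'D' for fr, fc in frontier):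
--                 return depth
--             nxt = []
--             for fr, fc in frontier:
--                 for nr, nc in ((fr, fc + 1), (fr + 1, fc), (fr, fc - 1), (fr - 1, fc)):
--                     if 0 <= nr < rows and 0 <= nc < cols and city[nr][nc] != 'X' and (nr, nc) not in visited:
--                         visited.add((nr, nc))
--                         nxt.append((nr, nc))
--             frontier = nxt
--             depth += 1
--         return -1
--
--     return [nearest(r, c) for r, c in locations]
-- ===== Notes on version B (the rewrite author's own statement) =====
-- stated objective: alternative
-- what changed: Replaced the single multi-source BFS that precomputes a whole distance grid (deque of (r,c,dist) triples, then table lookups per query) by an independent single-source level-by-level frontier BFS run from each query cell, returning the depth at which the first DashMart appears.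
import Mathlib
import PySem

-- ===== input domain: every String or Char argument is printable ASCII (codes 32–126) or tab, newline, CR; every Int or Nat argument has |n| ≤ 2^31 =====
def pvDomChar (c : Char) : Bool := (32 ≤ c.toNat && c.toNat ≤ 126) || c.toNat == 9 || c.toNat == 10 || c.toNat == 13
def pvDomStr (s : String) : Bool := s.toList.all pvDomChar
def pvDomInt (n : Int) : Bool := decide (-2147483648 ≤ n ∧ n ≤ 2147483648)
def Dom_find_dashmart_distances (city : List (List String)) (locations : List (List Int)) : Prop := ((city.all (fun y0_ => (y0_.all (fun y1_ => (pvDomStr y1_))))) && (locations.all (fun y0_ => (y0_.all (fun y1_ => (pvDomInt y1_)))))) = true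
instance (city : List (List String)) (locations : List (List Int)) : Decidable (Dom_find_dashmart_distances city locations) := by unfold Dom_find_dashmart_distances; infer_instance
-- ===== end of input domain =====

-- B replaces A's single multi-source BFS + distance-table lookups by an independent
-- single-source frontier BFS per query (objective: alternative algorithm, not faster).

-- ===== PORT A =====
-- city[r][c] under the in-range guards Python A itself performs (exact there)
def pvCell (city : List (List String)) (r c : Nat) : String := (city.getD r []).getD c ""

def pvGet2 (g : List (List Int)) (r c : Nat) : Int := (g.getD r []).getD c 0

def pvSet2 (g : List (List Int)) (r c : Nat) (v : Int) : List (List Int) :=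
  g.set r ((g.getD r []).set c v)

def pvDirs : List (Int × Int) := [(0,1),(1,0),(0,-1),(-1,0)]

-- Step 1 of A: find all DashMarts (queue them), mark blocked cells
def pvInitA (city : List (List String)) (rows cols : Nat) :
    List (List Int) × List (Int × Int × Int) :=
  (List.range rows).foldl (fun st r =>
    (List.range cols).foldl (fun st c =>
      if pvCell city r c = "D" then (pvSet2 st.1 r c 0, st.2 ++ [((r:Int), (c:Int), 0)])
      else if pvCell city r c = "X" then (pvSet2 st.1 r c (-1), st.2)
      else st) st) (List.replicate rows (List.replicate cols (-1)), [])

-- the body of A's inner `for dr, dc in directions` loop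
def pvStepA (city : List (List String)) (rows cols : Nat) (r c d : Int)
    (st : List (List Int) × List (Int × Int × Int)) (dir : Int × Int) :
    List (List Int) × List (Int × Int × Int) :=
  let nr := r + dir.1
  let nc := c + dir.2
  if 0 ≤ nr ∧ nr < (rows:Int) ∧ 0 ≤ nc ∧ nc < (cols:Int) then
    if pvCell city nr.toNat nc.toNat ≠ "X" ∧ pvGet2 st.1 nr.toNat nc.toNat = -1 then
      (pvSet2 st.1 nr.toNat nc.toNat (d+1), st.2 ++ [(nr, nc, d+1)])
    else st
  else st

-- Step 2 of A: the while-queue BFS; fuel = rows*cols bounds the number of pops (proved below)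
def pvLoopA (city : List (List String)) (rows cols : Nat) :
    Nat → List (List Int) → List (Int × Int × Int) → List (List Int)
  | 0, dist, _ => dist
  | _+1, dist, [] => dist
  | fuel+1, dist, (r, c, d) :: rest =>
    let st := pvDirs.foldl (pvStepA city rows cols r c d) (dist, rest)
    pvLoopA city rows cols fuel st.1 st.2

def find_dashmart_distances (city : List (List String)) (locations : List (List Int)) : List Int :=
  if city = [] ∨ city.headD [] = [] then locations.map (fun _ => -1)
  else
    let rows := city.length
    let cols := (city.headD []).length
    let st := pvInitA city rows cols
    let dist := pvLoopA city rows cols (rows*cols) st.1 st.2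
    locations.foldl (fun res loc =>
      let row := loc.getD 0 0
      let col := loc.getD 1 0
      res ++ [if 0 ≤ row ∧ row < (rows:Int) ∧ 0 ≤ col ∧ col < (cols:Int) then
                pvGet2 dist row.toNat col.toNat else -1]) []

-- ===== PORT B =====
def pvNbrs (p : Int × Int) : List (Int × Int) :=
  [(p.1, p.2+1), (p.1+1, p.2), (p.1, p.2-1), (p.1-1, p.2)]

-- the body of B's neighbour loop
def pvStepB (city : List (List String)) (rows cols : Nat)
    (st : PySem.Set (Int × Int) × List (Int × Int)) (q : Int × Int) :
    PySem.Set (Int × Int) × List (Int × Int) :=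
  if (0 ≤ q.1 ∧ q.1 < (rows:Int) ∧ 0 ≤ q.2 ∧ q.2 < (cols:Int)) ∧
      pvCell city q.1.toNat q.2.toNat ≠ "X" ∧ ¬ st.1.contains q then
    (st.1.add q, st.2 ++ [q])
  else st

-- B's `while frontier:` loop; fuel = rows*cols+2 bounds the number of levels (proved below)
def pvLoopB (city : List (List String)) (rows cols : Nat) :
    Nat → PySem.Set (Int × Int) → List (Int × Int) → Int → Int
  | 0, _, _, _ => -1
  | fuel+1, visited, frontier, depth =>
    if frontier = [] then -1
    else if frontier.any (fun f => pvCell city f.1.toNat f.2.toNat == "D") then depth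
    else
      let st := frontier.foldl (fun st f => (pvNbrs f).foldl (pvStepB city rows cols) st)
          (visited, ([] : List (Int × Int)))
      pvLoopB city rows cols fuel st.1 st.2 (depth + 1)

def pvNearest (city : List (List String)) (rows cols : Nat) (r c : Int) : Int :=
  if ¬(0 ≤ r ∧ r < (rows:Int) ∧ 0 ≤ c ∧ c < (cols:Int)) ∨ pvCell city r.toNat c.toNat = "X" then -1
  else pvLoopB city rows cols (rows*cols+2) (PySem.Set.ofList [(r, c)]) [(r, c)] 0

def find_dashmart_distances_alt (city : List (List String)) (locations : List (List Int)) : List Int :=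
  if city = [] ∨ city.headD [] = [] then locations.map (fun _ => -1)
  else locations.map (fun loc =>
    pvNearest city city.length (city.headD []).length (loc.getD 0 0) (loc.getD 1 0))

-- ===== PRECONDITION & SPEC =====
-- Pre_ excludes exactly the inputs on which Python A raises: when the grid is nonempty,
-- a query entry that is not a [row, col] pair (unpacking ValueError) or a grid row shorter
-- than the first row (IndexError while scanning/BFS).  A returns normally everywhere else.
def Pre_find_dashmart_distances (city : List (List String)) (locations : List (List Int)) : Prop :=
  city ≠ [] → city.headD [] ≠ [] →
    ((∀ loc ∈ locations, loc.length = 2) ∧ ∀ row ∈ city, (city.headD []).length ≤ row.length)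
instance (city : List (List String)) (locations : List (List Int)) :
    Decidable (Pre_find_dashmart_distances city locations) := by
  unfold Pre_find_dashmart_distances; infer_instance

def pvWitness_find_dashmart_distances : List (List String) × List (List Int) :=
  ([["D", " "], [" ", "X"]], [[0,1],[1,1],[5,0]])

def Spec_find_dashmart_distances (city : List (List String)) (locations : List (List Int)) (out : List Int) : Prop := out = find_dashmart_distances_alt city locations
instance (city : List (List String)) (locations : List (List Int)) (out : List Int) : Decidable (Spec_find_dashmart_distances city locations out) := by unfold Spec_find_dashmart_distances; infer_instance

-- ===== CLAIM (what is proved, stated in full; the proofs are below) =====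
def Claim_equal_find_dashmart_distances : Prop := ∀ (city : List (List String)) (locations : List (List Int)), Dom_find_dashmart_distances city locations → Pre_find_dashmart_distances city locations → Spec_find_dashmart_distances city locations (find_dashmart_distances city locations)

-- ===== LEMMAS AND PROOFS =====

-- ---- the specification layer: reachability levels of the shared grid graph ----

def pvInb (R C : Nat) (p : Int × Int) : Prop :=
  0 ≤ p.1 ∧ p.1 < (R:Int) ∧ 0 ≤ p.2 ∧ p.2 < (C:Int)

def pvOpen (ci : List (List String)) (R C : Nat) (p : Int × Int) : Prop :=
  pvInb R C p ∧ pvCell ci p.1.toNat p.2.toNat ≠ "X"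

def pvIsD (ci : List (List String)) (R C : Nat) (p : Int × Int) : Prop :=
  pvInb R C p ∧ pvCell ci p.1.toNat p.2.toNat = "D"

def pvReach (ci : List (List String)) (R C : Nat) (src : Int × Int → Prop) :
    Nat → Int × Int → Prop
  | 0, p => src p
  | n+1, p => pvReach ci R C src n p ∨
      (pvOpen ci R C p ∧ ∃ q ∈ pvNbrs p, pvReach ci R C src n q)

def pvLvl (ci : List (List String)) (R C : Nat) (src : Int × Int → Prop) (n : Nat) (p : Int × Int) : Prop :=
  pvReach ci R C src n p ∧ ∀ m < n, ¬ pvReach ci R C src m p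

def pvAns (ci : List (List String)) (R C : Nat) (p : Int × Int) (v : Int) : Prop :=
  (∀ n, pvLvl ci R C (pvIsD ci R C) n p → v = (n:Int)) ∧
  ((¬ ∃ n, pvReach ci R C (pvIsD ci R C) n p) → v = -1)

def pvHit (ci : List (List String)) (R C : Nat) (src : Int × Int → Prop) (n : Nat) : Prop :=
  ∃ x, pvIsD ci R C x ∧ pvLvl ci R C src n x

def pvPath (ci : List (List String)) (R C : Nat) : Nat → Int × Int → Int × Int → Prop
  | 0, a, b => a = b
  | n+1, a, b => pvOpen ci R C b ∧ ∃ q ∈ pvNbrs b, pvPath ci R C n a q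

-- ---- grid bookkeeping ----

def pvShape (g : List (List Int)) (R C : Nat) : Prop :=
  g.length = R ∧ ∀ row ∈ g, row.length = C

def pvNeg (g : List (List Int)) : Nat :=
  (g.map (fun row => row.countP (fun v => v == -1))).sum

def pvMget (g : List (List Int)) (p : Int × Int) : Int := pvGet2 g p.1.toNat p.2.toNat

def pvEnt (x : Int) (f : Int × Int) : Int × Int × Int := (f.1, f.2, x)

def pvAllPos (R C : Nat) : List (Int × Int) :=
  (List.range R).flatMap (fun r : Nat => (List.range C).map (fun c : Nat => ((r:Int), (c:Int))))

def pvOpenB (ci : List (List String)) (R C : Nat) (p : Int × Int) : Bool :=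
  decide ((0 ≤ p.1 ∧ p.1 < (R:Int) ∧ 0 ≤ p.2 ∧ p.2 < (C:Int)) ∧
          pvCell ci p.1.toNat p.2.toNat ≠ "X")

def pvUnvis (ci : List (List String)) (R C : Nat) (v : PySem.Set (Int × Int)) : Nat :=
  (pvAllPos R C).countP (fun p => pvOpenB ci R C p && !(v.contains p))

def pvInvA (ci : List (List String)) (R C : Nat) (dist : List (List Int))
    (F G : List (Int × Int)) (d : Nat) : Prop :=
  (∀ p n, n ≤ d → pvLvl ci R C (pvIsD ci R C) n p → pvMget dist p = (n:Int)) ∧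
  (∀ p ∈ G, pvLvl ci R C (pvIsD ci R C) (d+1) p) ∧
  (∀ p ∈ G, pvMget dist p = (d:Int)+1) ∧
  (∀ p, pvInb R C p → pvMget dist p ≠ -1 →
      (∃ n, n ≤ d ∧ pvLvl ci R C (pvIsD ci R C) n p) ∨ p ∈ G) ∧
  (∀ p, pvLvl ci R C (pvIsD ci R C) (d+1) p → p ∈ G ∨ ∃ f ∈ F, p ∈ pvNbrs f) ∧
  (∀ f ∈ F, pvLvl ci R C (pvIsD ci R C) d f)

-- ---- basic facts ----

theorem pv_nbrs_symm (p q : Int × Int) : q ∈ pvNbrs p ↔ p ∈ pvNbrs q := by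
  rcases p with ⟨a, b⟩; rcases q with ⟨x, y⟩
  simp only [pvNbrs, List.mem_cons, List.mem_singleton, List.not_mem_nil, or_false,
    Prod.mk.injEq]
  omega

theorem pv_isD_open (ci : List (List String)) (R C : Nat) (p : Int × Int)
    (h : pvIsD ci R C p) : pvOpen ci R C p := by
  obtain ⟨h1, h2⟩ := h
  exact ⟨h1, by rw [h2]; decide⟩

theorem pv_reach_mono (ci : List (List String)) (R C : Nat) (src : Int × Int → Prop)
    {m n : Nat} (hmn : m ≤ n) {p : Int × Int} (h : pvReach ci R C src m p) :
    pvReach ci R C src n p := by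
  induction hmn with
  | refl => exact h
  | step _ ih => exact Or.inl ih

theorem pv_reach_open (ci : List (List String)) (R C : Nat) (src : Int × Int → Prop)
    (hs : ∀ p, src p → pvOpen ci R C p) {n : Nat} {p : Int × Int}
    (h : pvReach ci R C src n p) : pvOpen ci R C p := by
  revert h
  induction n with
  | zero => exact fun h => hs p h
  | succ n ih =>
    intro h
    rcases h with h | h
    · exact ih h
    · exact h.1

theorem pv_exists_lvl (ci : List (List String)) (R C : Nat) (src : Int × Int → Prop)
    {n : Nat} {p : Int × Int} (h : pvReach ci R C src n p) :
    ∃ k, k ≤ n ∧ pvLvl ci R C src k p := by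
  suffices H : ∀ n p, pvReach ci R C src n p → ∃ k, k ≤ n ∧ pvLvl ci R C src k p by
    exact H n p h
  intro n
  induction n using Nat.strong_induction_on with
  | _ n ih =>
    intro p h
    by_cases hall : ∀ m, m < n → ¬ pvReach ci R C src m p
    · exact ⟨n, le_refl n, h, hall⟩
    · push_neg at hall
      obtain ⟨m, hm, hr⟩ := hall
      obtain ⟨k, hk, hl⟩ := ih m hm p hr
      exact ⟨k, by omega, hl⟩

theorem pv_lvl_succ_decomp (ci : List (List String)) (R C : Nat) (src : Int × Int → Prop)
    {n : Nat} {p : Int × Int} (h : pvLvl ci R C src (n+1) p) :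
    pvOpen ci R C p ∧ ∃ q ∈ pvNbrs p, pvLvl ci R C src n q := by
  obtain ⟨hr, hmin⟩ := h
  rcases hr with hr | ⟨ho, q, hq, hrq⟩
  · exact absurd hr (hmin n (by omega))
  · obtain ⟨k, hk, hl⟩ := pv_exists_lvl ci R C src hrq
    rcases Nat.lt_or_ge k n with h' | h'
    · exact absurd (Or.inr ⟨ho, q, hq, pv_reach_mono ci R C src (le_refl k) hl.1⟩ :
        pvReach ci R C src (k+1) p) (hmin (k+1) (by omega))
    · have : k = n := by omega
      subst this
      exact ⟨ho, q, hq, hl⟩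

theorem pv_lvl_unique (ci : List (List String)) (R C : Nat) (src : Int × Int → Prop)
    {m n : Nat} {p : Int × Int} (h1 : pvLvl ci R C src m p) (h2 : pvLvl ci R C src n p) :
    m = n := by
  by_contra hne
  rcases Nat.lt_or_ge m n with h | h
  · exact h2.2 m h h1.1
  · exact h1.2 n (by omega) h2.1

theorem pv_lvl_zero (ci : List (List String)) (R C : Nat) (src : Int × Int → Prop)
    (p : Int × Int) : pvLvl ci R C src 0 p ↔ src p := by
  constructor
  · exact fun h => h.1
  · exact fun h => ⟨h, fun m hm => absurd hm (by omega)⟩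

theorem pv_lvl_empty_propagate (ci : List (List String)) (R C : Nat) (src : Int × Int → Prop)
    {d : Nat} (h : ∀ p, ¬ pvLvl ci R C src d p) :
    ∀ k p, d ≤ k → ¬ pvLvl ci R C src k p := by
  intro k
  induction k with
  | zero =>
    intro p hd0
    have hd : d = 0 := by omega
    subst hd; exact h p
  | succ k ih =>
    intro p hdk hl
    rcases Nat.lt_or_ge d (k+1) with h' | h'
    · obtain ⟨-, q, hq, hql⟩ := pv_lvl_succ_decomp ci R C src hl
      exact ih q (by omega) hql
    · have hd : d = k+1 := by omega
      subst hd; exact h p hl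

-- ---- path symmetry ----

theorem pv_path_front (ci : List (List String)) (R C : Nat) :
    ∀ (n : Nat) (a b a0 : Int × Int), pvPath ci R C n a b → pvOpen ci R C a →
      a ∈ pvNbrs a0 → pvPath ci R C (n+1) a0 b := by
  intro n
  induction n with
  | zero =>
    intro a b a0 hp ho hn
    have hab : a = b := hp
    subst hab
    exact ⟨ho, a0, (pv_nbrs_symm a0 a).mp hn, rfl⟩
  | succ n ih =>
    intro a b a0 hp ho hn
    obtain ⟨hob, q, hq, hp'⟩ := hp
    exact ⟨hob, q, hq, ih a q a0 hp' ho hn⟩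

theorem pv_path_rev (ci : List (List String)) (R C : Nat) :
    ∀ (n : Nat) (a b : Int × Int), pvPath ci R C n a b → pvOpen ci R C a →
      pvPath ci R C n b a := by
  intro n
  induction n with
  | zero =>
    intro a b hp _
    have hab : a = b := hp
    subst hab; rfl
  | succ n ih =>
    intro a b hp ho
    obtain ⟨hob, q, hq, hp'⟩ := hp
    have hoq : pvOpen ci R C q := by
      cases n with
      | zero =>
        have haq : a = q := hp'
        subst haq; exact ho
      | succ m => exact hp'.1
    exact pv_path_front ci R C n q a b (ih a q hp' ho) hoq hq

theorem pv_path_reach (ci : List (List String)) (R C : Nat) (src : Int × Int → Prop) :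
    ∀ (k : Nat) (a p : Int × Int), src a → pvPath ci R C k a p → pvReach ci R C src k p := by
  intro k
  induction k with
  | zero =>
    intro a p ha hp
    have hap : a = p := hp
    subst hap; exact ha
  | succ k ih =>
    intro a p ha hp
    obtain ⟨ho, q, hq, hp'⟩ := hp
    exact Or.inr ⟨ho, q, hq, ih a q ha hp'⟩

theorem pv_reach_iff_path (ci : List (List String)) (R C : Nat) (src : Int × Int → Prop)
    (n : Nat) (p : Int × Int) :
    pvReach ci R C src n p ↔ ∃ k, k ≤ n ∧ ∃ a, src a ∧ pvPath ci R C k a p := by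
  constructor
  · induction n generalizing p with
    | zero => exact fun h => ⟨0, le_refl 0, p, h, rfl⟩
    | succ n ih =>
      intro h
      rcases h with h | ⟨ho, q, hq, hr⟩
      · obtain ⟨k, hk, a, ha, hp⟩ := ih p h
        exact ⟨k, by omega, a, ha, hp⟩
      · obtain ⟨k, hk, a, ha, hp⟩ := ih q hr
        exact ⟨k+1, by omega, a, ha, ho, q, hq, hp⟩
  · rintro ⟨k, hk, a, ha, hp⟩
    exact pv_reach_mono ci R C src hk (pv_path_reach ci R C src k a p ha hp)

theorem pv_reach_symm (ci : List (List String)) (R C : Nat) {q : Int × Int}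
    (hq : pvOpen ci R C q) (n : Nat) :
    pvReach ci R C (pvIsD ci R C) n q ↔
      ∃ x, pvIsD ci R C x ∧ pvReach ci R C (fun y => y = q) n x := by
  constructor
  · intro h
    obtain ⟨k, hk, a, haD, hp⟩ := (pv_reach_iff_path ci R C (pvIsD ci R C) n q).mp h
    refine ⟨a, haD, ?_⟩
    have hrev := pv_path_rev ci R C k a q hp (pv_isD_open ci R C a haD)
    exact pv_reach_mono ci R C _ hk
      (pv_path_reach ci R C (fun y => y = q) k q a rfl hrev)
  · rintro ⟨x, hxD, hr⟩
    obtain ⟨k, hk, a, ha, hp⟩ := (pv_reach_iff_path ci R C (fun y => y = q) n x).mp hr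
    rw [ha] at hp
    have hrev := pv_path_rev ci R C k q x hp hq
    exact pv_reach_mono ci R C _ hk (pv_path_reach ci R C (pvIsD ci R C) k x q hxD hrev)

-- ---- grid lemmas ----

theorem pv_getD_mem {α : Type} (l : List α) (n : Nat) (d : α) (h : n < l.length) :
    l.getD n d ∈ l := by
  rw [List.getD_eq_getElem?_getD, List.getElem?_eq_getElem h]
  exact List.getElem_mem h

theorem pv_getD_set {α : Type} (l : List α) (n m : Nat) (v d : α) (hn : n < l.length) :
    (l.set n v).getD m d = if m = n then v else l.getD m d := by
  rcases eq_or_ne m n with h | h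
  · subst h
    simp [List.getD_eq_getElem?_getD, List.getElem?_set_self, hn]
  · simp [List.getD_eq_getElem?_getD, List.getElem?_set_ne (Ne.symm h), h]

theorem pv_sum_set :
    ∀ (l : List Nat) (n : Nat) (x : Nat), n < l.length →
      (l.set n x).sum + l.getD n 0 = l.sum + x := by
  intro l
  induction l with
  | nil => intro n x h; simp at h
  | cons a t ih =>
    intro n x h
    cases n with
    | zero =>
      rw [List.set_cons_zero, List.getD_cons_zero, List.sum_cons, List.sum_cons]
      omega
    | succ n =>
      have h' : n < t.length := by simpa using h
      have := ih n x h'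
      rw [List.set_cons_succ, List.getD_cons_succ, List.sum_cons, List.sum_cons]
      omega

theorem pv_countP_set (p : Int → Bool) :
    ∀ (l : List Int) (n : Nat) (v : Int), n < l.length →
      (l.set n v).countP p + (if p (l.getD n 0) then 1 else 0)
        = l.countP p + (if p v then 1 else 0) := by
  intro l
  induction l with
  | nil => intro n v h; simp at h
  | cons a t ih =>
    intro n v h
    cases n with
    | zero =>
      rw [List.set_cons_zero, List.getD_cons_zero, List.countP_cons, List.countP_cons]
      omega
    | succ n =>
      have h' : n < t.length := by simpa using h
      have := ih n v h'
      rw [List.set_cons_succ, List.getD_cons_succ, List.countP_cons, List.countP_cons]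
      omega

theorem pv_shape_set2 {g : List (List Int)} {R C : Nat} (h : pvShape g R C)
    {r c : Nat} (hr : r < R) (hc : c < C) (v : Int) :
    pvShape (pvSet2 g r c v) R C := by
  obtain ⟨hl, hrow⟩ := h
  constructor
  · simpa [pvSet2] using hl
  · intro row hmem
    rcases List.mem_or_eq_of_mem_set hmem with h' | h'
    · exact hrow row h'
    · subst h'
      rw [List.length_set]
      exact hrow _ (pv_getD_mem _ _ _ (by omega))

theorem pv_get2_set2 {g : List (List Int)} {R C : Nat} (h : pvShape g R C)
    {r c : Nat} (hr : r < R) (hc : c < C) (v : Int) (r' c' : Nat) :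
    pvGet2 (pvSet2 g r c v) r' c' = if r' = r ∧ c' = c then v else pvGet2 g r' c' := by
  obtain ⟨hl, hrow⟩ := h
  have hrl : r < g.length := by omega
  unfold pvGet2 pvSet2
  rw [pv_getD_set g r r' _ [] hrl]
  rcases eq_or_ne r' r with h1 | h1
  · subst h1
    have hcl : c < (g.getD r' []).length := by
      rw [hrow _ (pv_getD_mem _ _ _ hrl)]; exact hc
    rw [if_pos rfl, pv_getD_set _ c c' v 0 hcl]
    by_cases h2 : c' = c <;> simp [h2]
  · simp [h1]

theorem pv_neg_set2 {g : List (List Int)} {R C : Nat} (h : pvShape g R C)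
    {r c : Nat} (hr : r < R) (hc : c < C) (v : Int) :
    pvNeg (pvSet2 g r c v) + (if pvGet2 g r c == -1 then 1 else 0)
      = pvNeg g + (if v == -1 then 1 else 0) := by
  obtain ⟨hl, hrow⟩ := h
  have hrl : r < g.length := by omega
  have hcl : c < (g.getD r []).length := by
    rw [hrow _ (pv_getD_mem _ _ _ hrl)]; exact hc
  unfold pvNeg pvSet2
  rw [List.map_set]
  have hsum := pv_sum_set ((g.map (fun row => row.countP (fun v => v == -1))))
      r (((g.getD r []).set c v).countP (fun v => v == -1)) (by simpa using hrl)
  have hgetmap : (g.map (fun row => row.countP (fun v => v == -1))).getD r 0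
      = (g.getD r []).countP (fun v => v == -1) := by
    rw [List.getD_eq_getElem?_getD, List.getD_eq_getElem?_getD, List.getElem?_map]
    rcases List.getElem?_eq_some_iff.mpr ⟨hrl, rfl⟩ with h'
    simp [h']
  rw [hgetmap] at hsum
  have hcnt := pv_countP_set (fun v => v == -1) (g.getD r []) c v hcl
  have hgc : pvGet2 g r c = (g.getD r []).getD c 0 := rfl
  rw [hgc]
  simp only [] at hcnt
  omega

theorem pv_neg_init (R C : Nat) : pvNeg (List.replicate R (List.replicate C (-1))) = R * C := by
  have h1 : (List.replicate C (-1:Int)).countP (fun v => v == -1) = C := by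
    induction C with
    | zero => rfl
    | succ n ih => simp [List.replicate_succ, List.countP_cons, ih]
  unfold pvNeg
  rw [List.map_replicate, h1]
  induction R with
  | zero => simp
  | succ n ih =>
    rw [List.replicate_succ, List.sum_cons, ih]
    ring

theorem pv_shape_init (R C : Nat) : pvShape (List.replicate R (List.replicate C (-1))) R C := by
  refine ⟨List.length_replicate, fun row h => ?_⟩
  rw [List.eq_of_mem_replicate h]
  exact List.length_replicate

theorem pv_mem_allPos (R C : Nat) (p : Int × Int) : p ∈ pvAllPos R C ↔ pvInb R C p := by
  rcases p with ⟨x, y⟩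
  simp only [pvAllPos, List.mem_flatMap, List.mem_map, List.mem_range, pvInb]
  constructor
  · rintro ⟨r, hr, c, hc, heq⟩
    rw [Prod.mk.injEq] at heq
    obtain ⟨h5, h6⟩ := heq
    refine ⟨?_, ?_, ?_, ?_⟩ <;> omega
  · rintro ⟨h1, h2, h3, h4⟩
    refine ⟨x.toNat, by omega, y.toNat, by omega, ?_⟩
    rw [Prod.mk.injEq]
    constructor <;> omega

theorem pv_length_allPos (R C : Nat) : (pvAllPos R C).length = R * C := by
  induction R with
  | zero => simp [pvAllPos]
  | succ R ih =>
    rw [pvAllPos, List.range_succ, List.flatMap_append, List.length_append]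
    have : pvAllPos R C = (List.range R).flatMap
        (fun r : Nat => (List.range C).map (fun c : Nat => ((r:Int), (c:Int)))) := rfl
    rw [← this, ih]
    simp [Nat.succ_mul]

theorem pv_nodup_allPos (R C : Nat) : (pvAllPos R C).Nodup := by
  induction R with
  | zero => simp [pvAllPos]
  | succ R ih =>
    rw [pvAllPos, List.range_succ, List.flatMap_append]
    have hL : pvAllPos R C = (List.range R).flatMap
        (fun r : Nat => (List.range C).map (fun c : Nat => ((r:Int), (c:Int)))) := rfl
    apply List.Nodup.append
    · rw [← hL]; exact ih
    · simp only [List.flatMap_cons, List.flatMap_nil, List.append_nil]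
      exact List.Nodup.map (fun a b h => by
        rw [Prod.mk.injEq] at h
        exact_mod_cast h.2) (List.nodup_range)
    · intro p hp hq
      rw [← hL] at hp
      rw [pv_mem_allPos] at hp
      simp only [List.flatMap_cons, List.flatMap_nil, List.append_nil, List.mem_map,
        List.mem_range] at hq
      obtain ⟨c, hc, heq⟩ := hq
      rw [Prod.mk.injEq] at heq
      obtain ⟨h1, h2, h3, h4⟩ := hp
      omega

theorem pv_countP_succ_le {α : Type} (P P' : α → Bool) :
    ∀ (l : List α) (x : α), x ∈ l → (∀ y, P' y = true → P y = true) →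
      P x = true → P' x = false → l.countP P' + 1 ≤ l.countP P := by
  intro l
  induction l with
  | nil => intro x hx; simp at hx
  | cons a t ih =>
    intro x hx hmono hPx hP'x
    rw [List.countP_cons, List.countP_cons]
    have hmt : t.countP P' ≤ t.countP P := List.countP_mono_left (fun a _ h => hmono a h)
    rcases List.mem_cons.mp hx with hax | hx'
    · rw [← hax]
      have e1 : (if P' x = true then 1 else 0) = 0 := by rw [hP'x]; simp
      have e2 : (if P x = true then 1 else 0) = 1 := by rw [hPx]; simp
      rw [e1, e2]
      omega
    · have h1 := ih x hx' hmono hPx hP'x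
      have h2 : (if P' a = true then 1 else 0) ≤ (if P a = true then 1 else 0) := by
        by_cases hcase : P' a = true
        · simp [hcase, hmono a hcase]
        · simp [hcase]
      omega

-- ---- A-side: the queue BFS ----

theorem pv_foldA_spec (ci : List (List String)) (R C : Nat) (f : Int × Int) (dI : Int)
    (hd : 0 ≤ dI) :
    ∀ (L : List (Int × Int)) (dist : List (List Int)) (q0 : List (Int × Int × Int)),
      pvShape dist R C →
      ∃ (dist' : List (List Int)) (New : List (Int × Int)),
        L.foldl (pvStepA ci R C f.1 f.2 dI) (dist, q0) = (dist', q0 ++ New.map (pvEnt (dI+1))) ∧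
        pvShape dist' R C ∧
        (∀ q ∈ New, (∃ dir ∈ L, q = (f.1 + dir.1, f.2 + dir.2)) ∧
            pvOpen ci R C q ∧ pvMget dist q = -1) ∧
        (∀ dir ∈ L, pvOpen ci R C (f.1 + dir.1, f.2 + dir.2) →
            pvMget dist (f.1 + dir.1, f.2 + dir.2) = -1 → (f.1 + dir.1, f.2 + dir.2) ∈ New) ∧
        (∀ p, pvInb R C p →
            pvMget dist' p = if p ∈ New then dI + 1 else pvMget dist p) ∧
        New.length + pvNeg dist' = pvNeg dist := by
  intro L
  induction L with
  | nil =>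
    intro dist q0 hsh
    exact ⟨dist, [], by simp, hsh, by simp, by simp, fun p _ => by simp, by simp⟩
  | cons dir L ih =>
    intro dist q0 hsh
    rw [List.foldl_cons]
    by_cases hin : 0 ≤ f.1 + dir.1 ∧ f.1 + dir.1 < (R:Int) ∧ 0 ≤ f.2 + dir.2 ∧ f.2 + dir.2 < (C:Int)
    · by_cases hg : pvCell ci (f.1 + dir.1).toNat (f.2 + dir.2).toNat ≠ "X" ∧
          pvGet2 dist (f.1 + dir.1).toNat (f.2 + dir.2).toNat = -1
      · have hstep : pvStepA ci R C f.1 f.2 dI (dist, q0) dir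
            = (pvSet2 dist (f.1 + dir.1).toNat (f.2 + dir.2).toNat (dI+1),
               q0 ++ [(f.1 + dir.1, f.2 + dir.2, dI + 1)]) := by
          simp only [pvStepA]
          rw [if_pos hin, if_pos hg]
        rw [hstep]
        have hr1 : (f.1 + dir.1).toNat < R := by omega
        have hc1 : (f.2 + dir.2).toNat < C := by omega
        have hsh1 := pv_shape_set2 hsh hr1 hc1 (dI+1)
        obtain ⟨dist', New', heq', hsh', hNew', hCompl', hVal', hCnt'⟩ :=
          ih (pvSet2 dist (f.1 + dir.1).toNat (f.2 + dir.2).toNat (dI+1))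
             (q0 ++ [(f.1 + dir.1, f.2 + dir.2, dI + 1)]) hsh1
        have hinb_q : pvInb R C (f.1 + dir.1, f.2 + dir.2) :=
          ⟨hin.1, hin.2.1, hin.2.2.1, hin.2.2.2⟩
        have hneq : ∀ x : Int × Int, pvInb R C x → x ≠ (f.1 + dir.1, f.2 + dir.2) →
            ¬(x.1.toNat = (f.1 + dir.1).toNat ∧ x.2.toNat = (f.2 + dir.2).toNat) := by
          rintro ⟨a, b⟩ hinb hne ⟨h1, h2⟩
          apply hne
          obtain ⟨ha1, ha2, ha3, ha4⟩ := hinb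
          rw [Prod.mk.injEq]
          constructor <;> simp at h1 h2 ⊢ <;> omega
        have hset_self : pvMget (pvSet2 dist (f.1+dir.1).toNat (f.2+dir.2).toNat (dI+1))
            (f.1 + dir.1, f.2 + dir.2) = dI + 1 := by
          unfold pvMget
          rw [pv_get2_set2 hsh hr1 hc1]
          simp
        have hset_other : ∀ x : Int × Int, pvInb R C x → x ≠ (f.1 + dir.1, f.2 + dir.2) →
            pvMget (pvSet2 dist (f.1+dir.1).toNat (f.2+dir.2).toNat (dI+1)) x = pvMget dist x := by
          intro x hx hne
          unfold pvMget
          rw [pv_get2_set2 hsh hr1 hc1]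
          rw [if_neg (hneq x hx hne)]
        have hd1ne : dI + 1 ≠ -1 := by omega
        refine ⟨dist', (f.1 + dir.1, f.2 + dir.2) :: New', ?_, hsh', ?_, ?_, ?_, ?_⟩
        · rw [heq']
          simp [pvEnt, List.append_assoc]
        · intro q hq
          rcases List.mem_cons.mp hq with rfl | hq'
          · exact ⟨⟨dir, by simp, rfl⟩, ⟨hinb_q, hg.1⟩, hg.2⟩
          · obtain ⟨⟨dir', hdir', hq'eq⟩, ho', hm'⟩ := hNew' q hq'
            have hqne : q ≠ (f.1 + dir.1, f.2 + dir.2) := by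
              intro hcontra
              rw [hcontra, hset_self] at hm'
              exact hd1ne hm'
            refine ⟨⟨dir', List.mem_cons_of_mem dir hdir', hq'eq⟩, ho', ?_⟩
            rw [← hset_other q ho'.1 hqne]
            exact hm'
        · intro dir' hdir' ho hm
          rcases List.mem_cons.mp hdir' with hdd | hdir''
          · subst hdd
            exact List.mem_cons_self ..
          · by_cases hsame : (f.1 + dir'.1, f.2 + dir'.2) = (f.1 + dir.1, f.2 + dir.2)
            · rw [hsame]
              exact List.mem_cons_self ..
            · refine List.mem_cons_of_mem _ (hCompl' dir' hdir'' ho ?_)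
              rw [hset_other _ ho.1 hsame]
              exact hm
        · intro p hp
          rw [hVal' p hp]
          by_cases hmem : p ∈ New'
          · rw [if_pos hmem, if_pos (List.mem_cons_of_mem _ hmem)]
          · rw [if_neg hmem]
            by_cases hpq : p = (f.1 + dir.1, f.2 + dir.2)
            · rw [hpq, hset_self, if_pos (List.mem_cons_self ..)]
            · rw [hset_other p hp hpq, if_neg (by simp [hpq, hmem])]
        · have hflip := pv_neg_set2 hsh hr1 hc1 (dI+1)
          have e1 : (pvGet2 dist (f.1+dir.1).toNat (f.2+dir.2).toNat == -1) = true := by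
            simp [hg.2]
          have e2 : ((dI + 1 : Int) == -1) = false := by
            simp
            omega
          rw [e1, e2] at hflip
          simp at hflip
          simp only [List.length_cons]
          omega
      · have hstep : pvStepA ci R C f.1 f.2 dI (dist, q0) dir = (dist, q0) := by
          simp only [pvStepA]
          rw [if_pos hin, if_neg hg]
        rw [hstep]
        obtain ⟨dist', New', heq', hsh', hNew', hCompl', hVal', hCnt'⟩ := ih dist q0 hsh
        refine ⟨dist', New', heq', hsh', ?_, ?_, hVal', hCnt'⟩
        · intro q hq
          obtain ⟨⟨dir', hdir', hqe⟩, ho, hm⟩ := hNew' q hq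
          exact ⟨⟨dir', List.mem_cons_of_mem dir hdir', hqe⟩, ho, hm⟩
        · intro dir' hdir' ho hm
          rcases List.mem_cons.mp hdir' with hdd | hdir''
          · exfalso
            subst hdd
            rcases not_and_or.mp hg with h' | h'
            · exact h' ho.2
            · exact h' hm
          · exact hCompl' dir' hdir'' ho hm
    · have hstep : pvStepA ci R C f.1 f.2 dI (dist, q0) dir = (dist, q0) := by
        simp only [pvStepA]
        rw [if_neg hin]
      rw [hstep]
      obtain ⟨dist', New', heq', hsh', hNew', hCompl', hVal', hCnt'⟩ := ih dist q0 hsh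
      refine ⟨dist', New', heq', hsh', ?_, ?_, hVal', hCnt'⟩
      · intro q hq
        obtain ⟨⟨dir', hdir', hqe⟩, ho, hm⟩ := hNew' q hq
        exact ⟨⟨dir', List.mem_cons_of_mem dir hdir', hqe⟩, ho, hm⟩
      · intro dir' hdir' ho hm
        rcases List.mem_cons.mp hdir' with hdd | hdir''
        · exfalso
          subst hdd
          exact hin ⟨ho.1.1, ho.1.2.1, ho.1.2.2.1, ho.1.2.2.2⟩
        · exact hCompl' dir' hdir'' ho hm

theorem pv_invA_shift (ci : List (List String)) (R C : Nat) (dist : List (List Int))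
    (G : List (Int × Int)) (d : Nat) (h : pvInvA ci R C dist [] G d) :
    pvInvA ci R C dist G [] (d+1) := by
  obtain ⟨h1, h2, h3, h4, h5, h6⟩ := h
  refine ⟨?_, by simp, by simp, ?_, ?_, h2⟩
  · intro p n hn hl
    rcases Nat.lt_or_ge n (d+1) with h' | h'
    · exact h1 p n (by omega) hl
    · have hn1 : n = d + 1 := by omega
      subst hn1
      rcases h5 p hl with hG | hF
      · rw [h3 p hG]
        push_cast
        ring
      · obtain ⟨f, hf, -⟩ := hF
        exact absurd hf (List.not_mem_nil)
  · intro p hp hm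
    rcases h4 p hp hm with ⟨n, hn, hl⟩ | hG
    · exact Or.inl ⟨n, by omega, hl⟩
    · exact Or.inl ⟨d+1, le_refl _, h2 p hG⟩
  · intro p hl
    obtain ⟨ho, q, hq, hql⟩ := pv_lvl_succ_decomp ci R C _ hl
    rcases h5 q hql with hG | hF
    · exact Or.inr ⟨q, hG, (pv_nbrs_symm p q).mp hq⟩
    · obtain ⟨f, hf, -⟩ := hF
      exact absurd hf (List.not_mem_nil)

theorem pv_invA_done (ci : List (List String)) (R C : Nat) (dist : List (List Int))
    (d : Nat) (h : pvInvA ci R C dist [] [] d) :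
    ∀ p, pvInb R C p → pvAns ci R C p (pvMget dist p) := by
  obtain ⟨h1, h2, h3, h4, h5, h6⟩ := h
  have hempty : ∀ p, ¬ pvLvl ci R C (pvIsD ci R C) (d+1) p := by
    intro p hl
    rcases h5 p hl with hG | ⟨f, hf, -⟩
    · exact absurd hG (List.not_mem_nil)
    · exact absurd hf (List.not_mem_nil)
  have hprop := pv_lvl_empty_propagate ci R C (pvIsD ci R C) hempty
  intro p hp
  constructor
  · intro n hl
    rcases Nat.lt_or_ge n (d+1) with h' | h'
    · exact h1 p n (by omega) hl
    · exact absurd hl (hprop n p (by omega))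
  · intro hnr
    by_contra hne
    rcases h4 p hp hne with ⟨n, hn, hl⟩ | hG
    · exact hnr ⟨n, hl.1⟩
    · exact absurd hG (List.not_mem_nil)

theorem pv_invA_pop (ci : List (List String)) (R C : Nat) (dist : List (List Int))
    (f : Int × Int) (F G New : List (Int × Int)) (d : Nat)
    (hInv : pvInvA ci R C dist (f :: F) G d)
    (dist' : List (List Int))
    (hNew : ∀ q ∈ New, q ∈ pvNbrs f ∧ pvOpen ci R C q ∧ pvMget dist q = -1)
    (hCompl : ∀ q ∈ pvNbrs f, pvOpen ci R C q → pvMget dist q = -1 → q ∈ New)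
    (hVal : ∀ p, pvInb R C p → pvMget dist' p = if p ∈ New then (d:Int) + 1 else pvMget dist p) :
    pvInvA ci R C dist' F (G ++ New) d := by
  obtain ⟨h1, h2, h3, h4, h5, h6⟩ := hInv
  have hf : pvLvl ci R C (pvIsD ci R C) d f := h6 f (by simp)
  have hunreach : ∀ q, pvInb R C q → pvMget dist q = -1 →
      ¬ pvReach ci R C (pvIsD ci R C) d q := by
    intro q hq hm hre
    obtain ⟨k, hk, hlv⟩ := pv_exists_lvl ci R C _ hre
    have := h1 q k hk hlv
    rw [hm] at this
    omega
  have hNewLvl : ∀ q ∈ New, pvLvl ci R C (pvIsD ci R C) (d+1) q := by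
    intro q hq
    obtain ⟨hnb, ho, hm⟩ := hNew q hq
    refine ⟨Or.inr ⟨ho, f, (pv_nbrs_symm f q).mp hnb, hf.1⟩, ?_⟩
    intro m hm'
    intro hre
    exact hunreach q ho.1 hm (pv_reach_mono ci R C _ (by omega) hre)
  refine ⟨?_, ?_, ?_, ?_, ?_, fun x hx => h6 x (List.mem_cons_of_mem f hx)⟩
  · intro p n hn hl
    have hpinb : pvInb R C p :=
      (pv_reach_open ci R C _ (pv_isD_open ci R C) hl.1).1
    rw [hVal p hpinb]
    by_cases hmem : p ∈ New
    · have := pv_lvl_unique ci R C _ (hNewLvl p hmem) hl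
      omega
    · rw [if_neg hmem]
      exact h1 p n hn hl
  · intro p hp
    rcases List.mem_append.mp hp with hG | hN
    · exact h2 p hG
    · exact hNewLvl p hN
  · intro p hp
    rcases List.mem_append.mp hp with hG | hN
    · have hpinb : pvInb R C p :=
        (pv_reach_open ci R C _ (pv_isD_open ci R C) (h2 p hG).1).1
      rw [hVal p hpinb]
      by_cases hmem : p ∈ New
      · rw [if_pos hmem]
      · rw [if_neg hmem]
        exact h3 p hG
    · have hpinb : pvInb R C p := (hNew p hN).2.1.1
      rw [hVal p hpinb, if_pos hN]
  · intro p hp hm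
    rw [hVal p hp] at hm
    by_cases hmem : p ∈ New
    · exact Or.inr (List.mem_append.mpr (Or.inr hmem))
    · rw [if_neg hmem] at hm
      rcases h4 p hp hm with hl | hG
      · exact Or.inl hl
      · exact Or.inr (List.mem_append.mpr (Or.inl hG))
  · intro p hl
    rcases h5 p hl with hG | ⟨f', hf', hnb⟩
    · exact Or.inl (List.mem_append.mpr (Or.inl hG))
    · rcases List.mem_cons.mp hf' with hff | hfF
      · subst hff
        have ho : pvOpen ci R C p :=
          pv_reach_open ci R C _ (pv_isD_open ci R C) hl.1
        by_cases hm : pvMget dist p = -1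
        · exact Or.inl (List.mem_append.mpr (Or.inr (hCompl p hnb ho hm)))
        · rcases h4 p ho.1 hm with ⟨n, hn, hl'⟩ | hG
          · have := pv_lvl_unique ci R C _ hl' hl
            omega
          · exact Or.inl (List.mem_append.mpr (Or.inl hG))
      · exact Or.inr ⟨f', hfF, hnb⟩

theorem pv_loopA_spec (ci : List (List String)) (R C : Nat) :
    ∀ (fuel d : Nat) (F G : List (Int × Int)) (dist : List (List Int)),
      pvShape dist R C → pvInvA ci R C dist F G d →
      F.length + G.length + pvNeg dist ≤ fuel →
      ∀ p, pvInb R C p →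
        pvAns ci R C p (pvMget (pvLoopA ci R C fuel dist
          (F.map (pvEnt (d:Int)) ++ G.map (pvEnt ((d:Int)+1)))) p) := by
  intro fuel
  induction fuel with
  | zero =>
    intro d F G dist hsh hInv hb
    have hF : F = [] := List.length_eq_zero_iff.mp (by omega)
    have hG : G = [] := List.length_eq_zero_iff.mp (by omega)
    subst hF; subst hG
    intro p hp
    simpa [pvLoopA] using pv_invA_done ci R C dist d hInv p hp
  | succ fuel ihf =>
    intro d F G dist hsh hInv hb
    have hpop : ∀ (d : Nat) (f : Int × Int) (F G : List (Int × Int)) (dist : List (List Int)),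
        pvShape dist R C → pvInvA ci R C dist (f::F) G d →
        (f::F).length + G.length + pvNeg dist ≤ fuel + 1 →
        ∀ p, pvInb R C p →
          pvAns ci R C p (pvMget (pvLoopA ci R C (fuel+1) dist
            ((f::F).map (pvEnt (d:Int)) ++ G.map (pvEnt ((d:Int)+1)))) p) := by
      clear hInv hb hsh
      intro d f F G dist hsh hInv hb p hp
      obtain ⟨dist', New, heq, hsh', hNew, hCompl, hVal, hCnt⟩ :=
        pv_foldA_spec ci R C f (d:Int) (Int.natCast_nonneg d) pvDirs dist
          (F.map (pvEnt (d:Int)) ++ G.map (pvEnt ((d:Int)+1))) hsh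
      have hNbrsEq : ∀ q : Int × Int,
          (∃ dir ∈ pvDirs, q = (f.1 + dir.1, f.2 + dir.2)) ↔ q ∈ pvNbrs f := by
        intro q
        constructor
        · rintro ⟨dir, hdir, rfl⟩
          fin_cases hdir <;> simp [pvNbrs, Prod.ext_iff] <;> omega
        · intro hq
          simp only [pvNbrs, List.mem_cons, List.not_mem_nil, or_false] at hq
          rcases hq with h | h | h | h
          · exact ⟨(0,1), by simp [pvDirs], by simp [h]⟩
          · exact ⟨(1,0), by simp [pvDirs], by simp [h]⟩
          · exact ⟨(0,-1), by simp [pvDirs], by simp [h, Prod.ext_iff]; omega⟩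
          · exact ⟨(-1,0), by simp [pvDirs], by simp [h, Prod.ext_iff]; omega⟩
      have hstep : pvLoopA ci R C (fuel+1) dist
            ((f::F).map (pvEnt (d:Int)) ++ G.map (pvEnt ((d:Int)+1)))
          = pvLoopA ci R C fuel dist'
            (F.map (pvEnt (d:Int)) ++ (G ++ New).map (pvEnt ((d:Int)+1))) := by
        have hq1 : (f::F).map (pvEnt (d:Int)) ++ G.map (pvEnt ((d:Int)+1))
            = (f.1, f.2, (d:Int)) :: (F.map (pvEnt (d:Int)) ++ G.map (pvEnt ((d:Int)+1))) := by
          simp [pvEnt]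
        rw [hq1]
        show pvLoopA ci R C fuel
            (pvDirs.foldl (pvStepA ci R C f.1 f.2 (d:Int))
              (dist, F.map (pvEnt (d:Int)) ++ G.map (pvEnt ((d:Int)+1)))).1
            (pvDirs.foldl (pvStepA ci R C f.1 f.2 (d:Int))
              (dist, F.map (pvEnt (d:Int)) ++ G.map (pvEnt ((d:Int)+1)))).2 = _
        rw [heq]
        simp [List.map_append, List.append_assoc]
      rw [hstep]
      have hInv' : pvInvA ci R C dist' F (G ++ New) d := by
        refine pv_invA_pop ci R C dist f F G New d hInv dist' ?_ ?_ hVal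
        · intro q hq
          obtain ⟨hex, ho, hm⟩ := hNew q hq
          exact ⟨(hNbrsEq q).mp hex, ho, hm⟩
        · intro q hq ho hm
          obtain ⟨dir, hdir, hqe⟩ := (hNbrsEq q).mpr hq
          subst hqe
          exact hCompl dir hdir ho hm
      refine ihf d F (G ++ New) dist' hsh' hInv' ?_ p hp
      simp only [List.length_append, List.length_cons] at hb ⊢
      omega
    cases F with
    | cons f F' => exact hpop d f F' G dist hsh hInv hb
    | nil =>
      cases G with
      | nil =>
        intro p hp
        simpa [pvLoopA] using pv_invA_done ci R C dist d hInv p hp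
      | cons g G' =>
        have hInv' := pv_invA_shift ci R C dist (g::G') d hInv
        have hres := hpop (d+1) g G' [] dist hsh hInv' (by
          simp only [List.length_cons, List.length_nil] at hb ⊢
          omega)
        simpa using hres

def pvStepInit (ci : List (List String)) (st : List (List Int) × List (Int × Int × Int))
    (p : Int × Int) : List (List Int) × List (Int × Int × Int) :=
  if pvCell ci p.1.toNat p.2.toNat = "D" then
    (pvSet2 st.1 p.1.toNat p.2.toNat 0, st.2 ++ [(p.1, p.2, (0:Int))])
  else if pvCell ci p.1.toNat p.2.toNat = "X" then
    (pvSet2 st.1 p.1.toNat p.2.toNat (-1), st.2)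
  else st

theorem pv_getD_replicate {α : Type} (n m : Nat) (a d : α) (h : m < n) :
    (List.replicate n a).getD m d = a := by
  rw [List.getD_eq_getElem?_getD, List.getElem?_replicate, if_pos h]
  rfl

theorem pv_foldl_flatMap {α β γ : Type} (g : α → List β) (f : γ → β → γ) :
    ∀ (l : List α) (a : γ), (l.flatMap g).foldl f a = l.foldl (fun a x => (g x).foldl f a) a := by
  intro l
  induction l with
  | nil => intro a; simp
  | cons x t ih => intro a; simp [List.flatMap_cons, List.foldl_append, ih]

theorem pv_foldl_congr2 {α β : Type} (f g : β → α → β) :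
    ∀ (l : List α) (b : β), (∀ b x, f b x = g b x) → l.foldl f b = l.foldl g b := by
  intro l
  induction l with
  | nil => intro b _; rfl
  | cons x t ih =>
    intro b h
    rw [List.foldl_cons, List.foldl_cons, h b x]
    exact ih _ h

theorem pv_initA_eq_fold (ci : List (List String)) (R C : Nat) :
    pvInitA ci R C = (pvAllPos R C).foldl (pvStepInit ci)
      (List.replicate R (List.replicate C (-1)), []) := by
  unfold pvInitA pvAllPos
  rw [pv_foldl_flatMap]
  refine pv_foldl_congr2 _ _ _ _ ?_
  intro st r
  rw [List.foldl_map]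
  refine pv_foldl_congr2 _ _ _ _ ?_
  intro st' c
  simp [pvStepInit]

def pvInvInit (ci : List (List String)) (R C : Nat)
    (st : List (List Int) × List (Int × Int × Int)) (seen : List (Int × Int)) : Prop :=
  pvShape st.1 R C ∧
  (∀ p, pvInb R C p → p ∈ seen →
      pvMget st.1 p = (if pvCell ci p.1.toNat p.2.toNat = "D" then 0 else -1)) ∧
  (∀ p, pvInb R C p → p ∉ seen → pvMget st.1 p = -1) ∧
  st.2 = (seen.filter (fun p => pvCell ci p.1.toNat p.2.toNat == "D")).map (pvEnt 0) ∧
  st.2.length + pvNeg st.1 = R * C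

theorem pv_initfold_inv (ci : List (List String)) (R C : Nat) :
    ∀ (rest seen : List (Int × Int)) (st : List (List Int) × List (Int × Int × Int)),
      pvAllPos R C = seen ++ rest → pvInvInit ci R C st seen →
      pvInvInit ci R C (rest.foldl (pvStepInit ci) st) (seen ++ rest) := by
  intro rest
  induction rest with
  | nil =>
    intro seen st _ hInv
    simpa using hInv
  | cons x rest' ih =>
    intro seen st heq hInv
    obtain ⟨hsh, hseen, hout, hq, hcnt⟩ := hInv
    have hxmem : x ∈ pvAllPos R C := by rw [heq]; simp
    have hxinb : pvInb R C x := (pv_mem_allPos R C x).mp hxmem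
    have hr1 : x.1.toNat < R := by
      obtain ⟨a1, a2, a3, a4⟩ := hxinb; omega
    have hc1 : x.2.toNat < C := by
      obtain ⟨a1, a2, a3, a4⟩ := hxinb; omega
    have hnd := pv_nodup_allPos R C
    rw [heq] at hnd
    have hxseen : x ∉ seen := by
      have hnd2 := List.nodup_middle.mp hnd
      have hxall := (List.nodup_cons.mp hnd2).1
      exact fun hx => hxall (List.mem_append.mpr (Or.inl hx))
    have hmold : pvMget st.1 x = -1 := hout x hxinb hxseen
    have hneqx : ∀ p : Int × Int, pvInb R C p → p ≠ x →
        ¬(p.1.toNat = x.1.toNat ∧ p.2.toNat = x.2.toNat) := by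
      rintro ⟨a, b⟩ hinb hne ⟨e1, e2⟩
      apply hne
      obtain ⟨a1, a2, a3, a4⟩ := hinb
      obtain ⟨b1, b2, b3, b4⟩ := hxinb
      rw [Prod.mk.injEq]
      constructor <;> omega
    have hset_self : ∀ v : Int, pvMget (pvSet2 st.1 x.1.toNat x.2.toNat v) x = v := by
      intro v
      unfold pvMget
      rw [pv_get2_set2 hsh hr1 hc1]
      simp
    have hset_other : ∀ (v : Int) (p : Int × Int), pvInb R C p → p ≠ x →
        pvMget (pvSet2 st.1 x.1.toNat x.2.toNat v) p = pvMget st.1 p := by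
      intro v p hp hne
      unfold pvMget
      rw [pv_get2_set2 hsh hr1 hc1, if_neg (hneqx p hp hne)]
    have hkey : pvInvInit ci R C (pvStepInit ci st x) (seen ++ [x]) := by
      by_cases hD : pvCell ci x.1.toNat x.2.toNat = "D"
      · have hstep : pvStepInit ci st x
            = (pvSet2 st.1 x.1.toNat x.2.toNat 0, st.2 ++ [(x.1, x.2, (0:Int))]) := by
          simp [pvStepInit, hD]
        rw [hstep]
        refine ⟨pv_shape_set2 hsh hr1 hc1 0, ?_, ?_, ?_, ?_⟩
        · intro p hp hpmem
          rcases List.mem_append.mp hpmem with hps | hpx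
          · have hpne : p ≠ x := fun hc => hxseen (hc ▸ hps)
            rw [hset_other 0 p hp hpne]
            exact hseen p hp hps
          · have hpx' : p = x := by simpa using hpx
            subst hpx'
            rw [hset_self 0, if_pos hD]
        · intro p hp hpmem
          have hpne : p ≠ x := fun hc => hpmem (by simp [hc])
          rw [hset_other 0 p hp hpne]
          exact hout p hp (fun hc => hpmem (by simp [hc]))
        · rw [hq, List.filter_append]
          simp [hD, pvEnt]
        · have hflip := pv_neg_set2 hsh hr1 hc1 (0:Int)
          have e1 : (pvGet2 st.1 x.1.toNat x.2.toNat == -1) = true := by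
            have : pvGet2 st.1 x.1.toNat x.2.toNat = -1 := hmold
            simp [this]
          have e2 : ((0:Int) == -1) = false := by decide
          rw [e1, e2] at hflip
          simp at hflip
          show (st.2 ++ [(x.1, x.2, (0:Int))]).length
              + pvNeg (pvSet2 st.1 x.1.toNat x.2.toNat 0) = R * C
          simp only [List.length_append, List.length_cons, List.length_nil]
          omega
      · by_cases hX : pvCell ci x.1.toNat x.2.toNat = "X"
        · have hstep : pvStepInit ci st x
              = (pvSet2 st.1 x.1.toNat x.2.toNat (-1), st.2) := by
            simp [pvStepInit, hD, hX]
          rw [hstep]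
          refine ⟨pv_shape_set2 hsh hr1 hc1 (-1), ?_, ?_, ?_, ?_⟩
          · intro p hp hpmem
            rcases List.mem_append.mp hpmem with hps | hpx
            · have hpne : p ≠ x := fun hc => hxseen (hc ▸ hps)
              rw [hset_other (-1) p hp hpne]
              exact hseen p hp hps
            · have hpx' : p = x := by simpa using hpx
              subst hpx'
              rw [hset_self (-1), if_neg hD]
          · intro p hp hpmem
            have hpne : p ≠ x := fun hc => hpmem (by simp [hc])
            rw [hset_other (-1) p hp hpne]
            exact hout p hp (fun hc => hpmem (by simp [hc]))
          · rw [hq, List.filter_append]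
            simp [hD]
          · have hflip := pv_neg_set2 hsh hr1 hc1 (-1:Int)
            have e1 : (pvGet2 st.1 x.1.toNat x.2.toNat == -1) = true := by
              have : pvGet2 st.1 x.1.toNat x.2.toNat = -1 := hmold
              simp [this]
            have e2 : ((-1:Int) == -1) = true := by decide
            rw [e1, e2] at hflip
            simp at hflip
            show st.2.length + pvNeg (pvSet2 st.1 x.1.toNat x.2.toNat (-1)) = R * C
            omega
        · have hstep : pvStepInit ci st x = st := by
            simp [pvStepInit, hD, hX]
          rw [hstep]
          refine ⟨hsh, ?_, ?_, ?_, hcnt⟩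
          · intro p hp hpmem
            rcases List.mem_append.mp hpmem with hps | hpx
            · exact hseen p hp hps
            · have hpx' : p = x := by simpa using hpx
              subst hpx'
              rw [if_neg hD]
              exact hmold
          · intro p hp hpmem
            exact hout p hp (fun hc => hpmem (by simp [hc]))
          · rw [hq, List.filter_append]
            simp [hD]
    have heq' : pvAllPos R C = (seen ++ [x]) ++ rest' := by
      rw [heq]; simp
    have := ih (seen ++ [x]) (pvStepInit ci st x) heq' hkey
    simpa using this

theorem pv_init_spec (ci : List (List String)) (R C : Nat) :
    ∃ (F0 : List (Int × Int)), (pvInitA ci R C).2 = F0.map (pvEnt 0) ∧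
      pvShape (pvInitA ci R C).1 R C ∧
      (∀ p, pvInb R C p → pvMget (pvInitA ci R C).1 p
          = if pvCell ci p.1.toNat p.2.toNat = "D" then 0 else -1) ∧
      (∀ f ∈ F0, pvIsD ci R C f) ∧ (∀ p, pvIsD ci R C p → p ∈ F0) ∧
      F0.length + pvNeg (pvInitA ci R C).1 = R * C := by
  have hbase : pvInvInit ci R C (List.replicate R (List.replicate C (-1)), []) [] := by
    refine ⟨pv_shape_init R C, by simp, ?_, by simp, ?_⟩
    · intro p hp _
      obtain ⟨a1, a2, a3, a4⟩ := hp
      unfold pvMget pvGet2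
      rw [pv_getD_replicate R p.1.toNat (List.replicate C (-1:Int)) [] (by omega)]
      rw [pv_getD_replicate C p.2.toNat (-1:Int) 0 (by omega)]
    · simp [pv_neg_init]
  have hfin := pv_initfold_inv ci R C (pvAllPos R C) [] _ (by simp) hbase
  rw [← pv_initA_eq_fold ci R C] at hfin
  obtain ⟨hsh, hseen, hout, hq, hcnt⟩ := hfin
  refine ⟨(pvAllPos R C).filter (fun p => pvCell ci p.1.toNat p.2.toNat == "D"),
    by simpa using hq, hsh, ?_, ?_, ?_, ?_⟩
  · intro p hp
    exact hseen p hp (by simp [pv_mem_allPos, hp])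
  · intro f hf
    rcases List.mem_filter.mp hf with ⟨hmem, hcell⟩
    exact ⟨(pv_mem_allPos R C f).mp hmem, by simpa using hcell⟩
  · intro p hp
    exact List.mem_filter.mpr ⟨(pv_mem_allPos R C p).mpr hp.1, by simp [hp.2]⟩
  · rw [← hcnt, hq]
    simp

theorem pv_A_final (ci : List (List String)) (R C : Nat) :
    ∀ p, pvInb R C p →
      pvAns ci R C p (pvMget (pvLoopA ci R C (R*C) (pvInitA ci R C).1 (pvInitA ci R C).2) p) := by
  obtain ⟨F0, hq, hsh, hval, hF0D, hDF0, hcnt⟩ := pv_init_spec ci R C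
  have hInv : pvInvA ci R C (pvInitA ci R C).1 F0 [] 0 := by
    refine ⟨?_, by simp, by simp, ?_, ?_, ?_⟩
    · intro p n hn hl
      have hn0 : n = 0 := by omega
      subst hn0
      have hD : pvIsD ci R C p := (pv_lvl_zero ci R C _ p).mp hl
      rw [hval p hD.1, if_pos hD.2]
      simp
    · intro p hp hm
      rw [hval p hp] at hm
      by_cases hD : pvCell ci p.1.toNat p.2.toNat = "D"
      · exact Or.inl ⟨0, le_refl 0, (pv_lvl_zero ci R C _ p).mpr ⟨hp, hD⟩⟩
      · rw [if_neg hD] at hm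
        simp at hm
    · intro p hl
      obtain ⟨ho, q', hq', hql⟩ := pv_lvl_succ_decomp ci R C _ hl
      have hD : pvIsD ci R C q' := (pv_lvl_zero ci R C _ q').mp hql
      exact Or.inr ⟨q', hDF0 q' hD, (pv_nbrs_symm p q').mp hq'⟩
    · intro f hf
      exact (pv_lvl_zero ci R C _ f).mpr (hF0D f hf)
  have hmain := pv_loopA_spec ci R C (R*C) 0 F0 [] (pvInitA ci R C).1 hsh hInv
    (by simp only [List.length_nil]; omega)
  intro p hp
  have hm := hmain p hp
  rw [hq]
  simpa using hm

-- ---- B-side: the per-query frontier BFS ----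

theorem pv_foldB_inner (ci : List (List String)) (R C : Nat) :
    ∀ (L : List (Int × Int)) (v : PySem.Set (Int × Int)) (acc : List (Int × Int)),
      ∃ (v' : PySem.Set (Int × Int)) (New : List (Int × Int)), L.foldl (pvStepB ci R C) (v, acc) = (v', acc ++ New) ∧
        (∀ x, v'.contains x = true ↔ v.contains x = true ∨ x ∈ New) ∧
        (∀ q ∈ New, q ∈ L ∧ pvOpen ci R C q ∧ ¬ v.contains q = true) ∧
        (∀ q ∈ L, pvOpen ci R C q → v.contains q = true ∨ q ∈ New) := by
  intro L
  induction L with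
  | nil =>
    intro v acc
    exact ⟨v, [], by simp, by simp, by simp, by simp⟩
  | cons q0 L ih =>
    intro v acc
    rw [List.foldl_cons]
    by_cases hg : (0 ≤ q0.1 ∧ q0.1 < (R:Int) ∧ 0 ≤ q0.2 ∧ q0.2 < (C:Int)) ∧
        pvCell ci q0.1.toNat q0.2.toNat ≠ "X" ∧ ¬ v.contains q0 = true
    · have hstep : pvStepB ci R C (v, acc) q0 = (v.add q0, acc ++ [q0]) := by
        simp only [pvStepB]
        rw [if_pos hg]
      rw [hstep]
      obtain ⟨v', New', heq', hcont', hNew', hCompl'⟩ := ih (v.add q0) (acc ++ [q0])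
      refine ⟨v', q0 :: New', by rw [heq']; simp, ?_, ?_, ?_⟩
      · intro x
        rw [hcont' x]
        constructor
        · rintro (hx | hx)
          · have := (PySem.Set.contains_iff _ _).mp hx
            rcases (PySem.Set.mem_add _ _ _).mp this with h' | h'
            · exact Or.inl ((PySem.Set.contains_iff _ _).mpr h')
            · exact Or.inr (by simp [h'])
          · exact Or.inr (by simp [hx])
        · rintro (hx | hx)
          · exact Or.inl ((PySem.Set.contains_iff _ _).mpr
              ((PySem.Set.mem_add _ _ _).mpr (Or.inl ((PySem.Set.contains_iff _ _).mp hx))))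
          · rcases List.mem_cons.mp hx with h' | h'
            · subst h'
              exact Or.inl ((PySem.Set.contains_iff _ _).mpr ((PySem.Set.mem_add _ _ _).mpr (Or.inr rfl)))
            · exact Or.inr h'
      · intro q hqmem
        rcases List.mem_cons.mp hqmem with h' | h'
        · subst h'
          exact ⟨by simp, ⟨hg.1, hg.2.1⟩, hg.2.2⟩
        · obtain ⟨hL, ho, hc⟩ := hNew' q h'
          refine ⟨List.mem_cons_of_mem q0 hL, ho, ?_⟩
          intro hcv
          exact hc ((PySem.Set.contains_iff _ _).mpr
            ((PySem.Set.mem_add _ _ _).mpr (Or.inl ((PySem.Set.contains_iff _ _).mp hcv))))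
      · intro q hqmem ho
        rcases List.mem_cons.mp hqmem with h' | h'
        · subst h'
          exact Or.inr (by simp)
        · rcases hCompl' q h' ho with hc | hc
          · have := (PySem.Set.contains_iff _ _).mp hc
            rcases (PySem.Set.mem_add _ _ _).mp this with h'' | h''
            · exact Or.inl ((PySem.Set.contains_iff _ _).mpr h'')
            · exact Or.inr (by simp [h''])
          · exact Or.inr (List.mem_cons_of_mem q0 hc)
    · have hstep : pvStepB ci R C (v, acc) q0 = (v, acc) := by
        simp only [pvStepB]
        rw [if_neg hg]
      rw [hstep]
      obtain ⟨v', New', heq', hcont', hNew', hCompl'⟩ := ih v acc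
      refine ⟨v', New', heq', hcont', ?_, ?_⟩
      · intro q hqmem
        obtain ⟨hL, ho, hc⟩ := hNew' q hqmem
        exact ⟨List.mem_cons_of_mem q0 hL, ho, hc⟩
      · intro q hqmem ho
        rcases List.mem_cons.mp hqmem with h' | h'
        · by_cases hc : v.contains q0 = true
          · exact Or.inl (by rw [h']; exact hc)
          · rw [h'] at ho
            exact absurd ⟨⟨ho.1.1, ho.1.2.1, ho.1.2.2.1, ho.1.2.2.2⟩, ho.2, hc⟩ hg
        · exact hCompl' q h' ho

theorem pv_foldB_outer (ci : List (List String)) (R C : Nat) :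
    ∀ (frontier : List (Int × Int)) (v : PySem.Set (Int × Int)) (acc : List (Int × Int)),
      ∃ (v' : PySem.Set (Int × Int)) (New : List (Int × Int)), frontier.foldl (fun st f => (pvNbrs f).foldl (pvStepB ci R C) st) (v, acc)
            = (v', acc ++ New) ∧
        (∀ x, v'.contains x = true ↔ v.contains x = true ∨ x ∈ New) ∧
        (∀ q ∈ New, (∃ f ∈ frontier, q ∈ pvNbrs f) ∧ pvOpen ci R C q ∧ ¬ v.contains q = true) ∧
        (∀ f ∈ frontier, ∀ q ∈ pvNbrs f, pvOpen ci R C q → v.contains q = true ∨ q ∈ New) := by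
  intro frontier
  induction frontier with
  | nil =>
    intro v acc
    exact ⟨v, [], by simp, by simp, by simp, by simp⟩
  | cons f fr ih =>
    intro v acc
    rw [List.foldl_cons]
    obtain ⟨v1, New0, heq0, hcont0, hNew0, hCompl0⟩ := pv_foldB_inner ci R C (pvNbrs f) v acc
    rw [heq0]
    obtain ⟨v', New1, heq1, hcont1, hNew1, hCompl1⟩ := ih v1 (acc ++ New0)
    refine ⟨v', New0 ++ New1, by rw [heq1]; simp, ?_, ?_, ?_⟩
    · intro x
      rw [hcont1 x, hcont0 x]
      simp [or_assoc]
    · intro q hqmem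
      rcases List.mem_append.mp hqmem with h' | h'
      · obtain ⟨hL, ho, hc⟩ := hNew0 q h'
        exact ⟨⟨f, by simp, hL⟩, ho, hc⟩
      · obtain ⟨⟨f', hf', hL⟩, ho, hc⟩ := hNew1 q h'
        refine ⟨⟨f', List.mem_cons_of_mem f hf', hL⟩, ho, ?_⟩
        intro hcv
        exact hc ((hcont0 q).mpr (Or.inl hcv))
    · intro f' hf' q hqn ho
      rcases List.mem_cons.mp hf' with h' | h'
      · subst h'
        rcases hCompl0 q hqn ho with hc | hc
        · exact Or.inl hc
        · exact Or.inr (List.mem_append.mpr (Or.inl hc))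
      · rcases hCompl1 f' h' q hqn ho with hc | hc
        · rcases (hcont0 q).mp hc with hc' | hc'
          · exact Or.inl hc'
          · exact Or.inr (List.mem_append.mpr (Or.inl hc'))
        · exact Or.inr (List.mem_append.mpr (Or.inr hc))

theorem pv_loopB_spec (ci : List (List String)) (R C : Nat) (src : Int × Int → Prop)
    (hs : ∀ p, src p → pvOpen ci R C p) :
    ∀ (fuel m : Nat) (v : PySem.Set (Int × Int)) (frontier : List (Int × Int)),
      (∀ p, v.contains p = true ↔ pvReach ci R C src m p) →
      (∀ p, p ∈ frontier ↔ pvLvl ci R C src m p) →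
      pvUnvis ci R C v + 2 ≤ fuel →
      (∀ n, m ≤ n → pvHit ci R C src n → (∀ k, m ≤ k → k < n → ¬ pvHit ci R C src k) →
          pvLoopB ci R C fuel v frontier (m:Int) = (n:Int)) ∧
      ((∀ n, m ≤ n → ¬ pvHit ci R C src n) → pvLoopB ci R C fuel v frontier (m:Int) = -1) := by
  have hOpenB : ∀ p, pvOpenB ci R C p = true ↔ pvOpen ci R C p := by
    intro p
    simp [pvOpenB, pvOpen, pvInb]
  intro fuel
  induction fuel with
  | zero =>
    intro m v frontier hv hf hfuel
    exact absurd hfuel (by omega)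
  | succ fuel ih =>
    intro m v frontier hv hf hfuel
    by_cases hfe : frontier = []
    · subst hfe
      have hempty : ∀ p, ¬ pvLvl ci R C src m p := by
        intro p hp
        simpa using (hf p).mpr hp
      have hnohit : ∀ n, m ≤ n → ¬ pvHit ci R C src n := by
        rintro n hn ⟨x, hxD, hxl⟩
        exact pv_lvl_empty_propagate ci R C src hempty n x hn hxl
      constructor
      · intro n hn hhit hmin
        exact absurd hhit (hnohit n hn)
      · intro _
        simp [pvLoopB]
    · by_cases hD : frontier.any (fun f => pvCell ci f.1.toNat f.2.toNat == "D") = true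
      · obtain ⟨f0, hf0mem, hf0D⟩ := List.any_eq_true.mp hD
        have hf0l : pvLvl ci R C src m f0 := (hf f0).mp hf0mem
        have hf0open : pvOpen ci R C f0 := pv_reach_open ci R C src hs hf0l.1
        have hf0isD : pvIsD ci R C f0 := ⟨hf0open.1, by simpa using hf0D⟩
        have hhitm : pvHit ci R C src m := ⟨f0, hf0isD, hf0l⟩
        have hloop : pvLoopB ci R C (fuel+1) v frontier (m:Int) = (m:Int) := by
          simp only [pvLoopB]
          rw [if_neg hfe, if_pos hD]
        constructor
        · intro n hn hhit hmin
          have hnm : n = m := by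
            by_contra hne
            exact hmin m (le_refl m) (by omega) hhitm
          rw [hloop, hnm]
        · intro hnone
          exact absurd hhitm (hnone m (le_refl m))
      · have hnohitm : ¬ pvHit ci R C src m := by
          rintro ⟨x, hxD, hxl⟩
          exact hD (List.any_eq_true.mpr ⟨x, (hf x).mpr hxl, by simp [hxD.2]⟩)
        obtain ⟨v', New, heq, hcont, hNew, hCompl⟩ := pv_foldB_outer ci R C frontier v []
        have hloop : pvLoopB ci R C (fuel+1) v frontier (m:Int)
            = pvLoopB ci R C fuel v' New ((m:Int)+1) := by
          simp only [pvLoopB]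
          rw [if_neg hfe, if_neg hD, heq]
          rfl
        have hlvlNew : ∀ p, p ∈ New ↔ pvLvl ci R C src (m+1) p := by
          intro p
          constructor
          · intro hp
            obtain ⟨⟨f, hfmem, hfn⟩, ho, hcv⟩ := hNew p hp
            have hfl : pvLvl ci R C src m f := (hf f).mp hfmem
            have hnr : ¬ pvReach ci R C src m p := fun hr => hcv ((hv p).mpr hr)
            refine ⟨Or.inr ⟨ho, f, (pv_nbrs_symm f p).mp hfn, hfl.1⟩, ?_⟩
            intro k hk hr
            exact hnr (pv_reach_mono ci R C src (by omega) hr)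
          · intro hp
            obtain ⟨ho, q, hq, hql⟩ := pv_lvl_succ_decomp ci R C src hp
            have hqf : q ∈ frontier := (hf q).mpr hql
            have hnp : ¬ v.contains p = true := by
              intro hc
              exact hp.2 m (by omega) ((hv p).mp hc)
            rcases hCompl q hqf p ((pv_nbrs_symm p q).mp hq) ho with hc | hc
            · exact absurd hc hnp
            · exact hc
        have hcont' : ∀ p, v'.contains p = true ↔ pvReach ci R C src (m+1) p := by
          intro p
          rw [hcont p]
          constructor
          · rintro (hc | hc)
            · exact Or.inl ((hv p).mp hc)
            · exact ((hlvlNew p).mp hc).1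
          · intro hr
            by_cases hrm : pvReach ci R C src m p
            · exact Or.inl ((hv p).mpr hrm)
            · refine Or.inr ((hlvlNew p).mpr ⟨hr, ?_⟩)
              intro k hk hrk
              exact hrm (pv_reach_mono ci R C src (by omega) hrk)
        by_cases hNeE : New = []
        · have hempty1 : ∀ p, ¬ pvLvl ci R C src (m+1) p := by
            intro p hp
            have := (hlvlNew p).mpr hp
            rw [hNeE] at this
            simp at this
          have hnohit : ∀ n, m ≤ n → ¬ pvHit ci R C src n := by
            intro n hn hhit
            rcases Nat.eq_or_lt_of_le hn with he | hlt
            · exact hnohitm (he ▸ hhit)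
            · obtain ⟨x, hxD, hxl⟩ := hhit
              exact pv_lvl_empty_propagate ci R C src hempty1 n x (by omega) hxl
          have hres : pvLoopB ci R C fuel v' New ((m:Int)+1) = -1 := by
            rw [hNeE]
            cases fuel with
            | zero => exact absurd hfuel (by omega)
            | succ fuel' => simp [pvLoopB]
          constructor
          · intro n hn hhit hmin
            exact absurd hhit (hnohit n hn)
          · intro _
            rw [hloop, hres]
        · obtain ⟨n0, hn0⟩ := List.exists_mem_of_ne_nil New hNeE
          obtain ⟨⟨f, hfmem, hfn⟩, ho, hcv⟩ := hNew n0 hn0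
          have hP'false : (pvOpenB ci R C n0 && !(v'.contains n0)) = false := by
            have hc : v'.contains n0 = true := (hcont n0).mpr (Or.inr hn0)
            rw [hc]
            simp
          have hPtrue : (pvOpenB ci R C n0 && !(v.contains n0)) = true := by
            have h1 : pvOpenB ci R C n0 = true := (hOpenB n0).mpr ho
            have h2 : v.contains n0 = false := by
              rcases Bool.eq_false_or_eq_true (v.contains n0) with h | h
              · exact absurd h hcv
              · exact h
            rw [h1, h2]
            rfl
          have hunv : pvUnvis ci R C v' + 1 ≤ pvUnvis ci R C v := by
            apply pv_countP_succ_le _ _ (pvAllPos R C) n0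
                ((pv_mem_allPos R C n0).mpr ho.1) ?_ hPtrue hP'false
            intro y hy
            rcases (Bool.and_eq_true _ _).mp hy with ⟨hy1, hy2⟩
            have hy3 : v.contains y = false := by
              rcases Bool.eq_false_or_eq_true (v.contains y) with h | h
              · exfalso
                have hcy : v'.contains y = true := (hcont y).mpr (Or.inl h)
                rw [hcy] at hy2
                simp at hy2
              · exact h
            rw [hy1, hy3]
            rfl
          have hih := ih (m+1) v' New hcont' hlvlNew (by omega)
          have hcast : (((m+1 : Nat)) : Int) = (m:Int)+1 := by push_cast; ring
          rw [hcast] at hih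
          constructor
          · intro n hn hhit hmin
            have hn1 : m + 1 ≤ n := by
              rcases Nat.eq_or_lt_of_le hn with he | hlt
              · exact absurd (he ▸ hhit) hnohitm
              · omega
            rw [hloop]
            exact hih.1 n hn1 hhit (fun k hk1 hk2 => hmin k (by omega) hk2)
          · intro hnone
            rw [hloop]
            exact hih.2 (fun n hn => hnone n (by omega))

theorem pv_ans_unique (ci : List (List String)) (R C : Nat) (p : Int × Int) (v1 v2 : Int)
    (h1 : pvAns ci R C p v1) (h2 : pvAns ci R C p v2) : v1 = v2 := by
  by_cases h : ∃ n, pvReach ci R C (pvIsD ci R C) n p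
  · obtain ⟨n, hn⟩ := h
    obtain ⟨k, hk, hl⟩ := pv_exists_lvl ci R C _ hn
    rw [h1.1 k hl, h2.1 k hl]
  · rw [h1.2 h, h2.2 h]

theorem pv_noreach_nonopen (ci : List (List String)) (R C : Nat) {p : Int × Int}
    (hp : ¬ pvOpen ci R C p) : ¬ ∃ n, pvReach ci R C (pvIsD ci R C) n p := by
  rintro ⟨n, hn⟩
  exact hp (pv_reach_open ci R C _ (pv_isD_open ci R C) hn)

theorem pv_nearest_ans (ci : List (List String)) (R C : Nat) (r c : Int) :
    pvAns ci R C (r, c) (pvNearest ci R C r c) := by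
  unfold pvNearest
  by_cases hguard : ¬(0 ≤ r ∧ r < (R:Int) ∧ 0 ≤ c ∧ c < (C:Int)) ∨ pvCell ci r.toNat c.toNat = "X"
  · rw [if_pos hguard]
    have hnopen : ¬ pvOpen ci R C (r, c) := by
      rcases hguard with h | h
      · exact fun ho => h ⟨ho.1.1, ho.1.2.1, ho.1.2.2.1, ho.1.2.2.2⟩
      · exact fun ho => ho.2 h
    have hnr := pv_noreach_nonopen ci R C hnopen
    constructor
    · intro n hl
      exact absurd ⟨n, hl.1⟩ hnr
    · intro _
      rfl
  · rw [if_neg hguard]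
    obtain ⟨hnnA, hnX⟩ := not_or.mp hguard
    have hA := not_not.mp hnnA
    have hopen : pvOpen ci R C (r, c) := ⟨⟨hA.1, hA.2.1, hA.2.2.1, hA.2.2.2⟩, hnX⟩
    have hs : ∀ p, (fun y : Int × Int => y = (r, c)) p → pvOpen ci R C p := by
      intro p hp
      rw [hp]
      exact hopen
    have hv0 : ∀ p, (PySem.Set.ofList [(r, c)]).contains p = true
        ↔ pvReach ci R C (fun y : Int × Int => y = (r, c)) 0 p := by
      intro p
      rw [PySem.Set.contains_iff]
      constructor
      · intro h
        have : p ∈ [(r, c)] := (PySem.Set.mem_ofList _ _).mp h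
        simpa using this
      · intro h
        have hp : p = (r, c) := h
        exact (PySem.Set.mem_ofList _ _).mpr (by simp [hp])
    have hf0 : ∀ p, p ∈ [(r, c)] ↔ pvLvl ci R C (fun y : Int × Int => y = (r, c)) 0 p := by
      intro p
      rw [pv_lvl_zero]
      simp
    have hfuel : pvUnvis ci R C (PySem.Set.ofList [(r, c)]) + 2 ≤ R*C + 2 := by
      have h1 : pvUnvis ci R C (PySem.Set.ofList [(r, c)]) ≤ (pvAllPos R C).length :=
        List.countP_le_length
      rw [pv_length_allPos] at h1
      omega
    have hmain := pv_loopB_spec ci R C (fun y : Int × Int => y = (r, c)) hs (R*C+2) 0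
      (PySem.Set.ofList [(r, c)]) [(r, c)] hv0 hf0 hfuel
    have hhitTrans : ∀ k, pvHit ci R C (fun y : Int × Int => y = (r, c)) k →
        pvReach ci R C (pvIsD ci R C) k (r, c) := by
      rintro k ⟨x, hxD, hxl⟩
      exact (pv_reach_symm ci R C hopen k).mpr ⟨x, hxD, hxl.1⟩
    constructor
    · intro n hl
      have hge : ∀ k, pvHit ci R C (fun y : Int × Int => y = (r, c)) k → n ≤ k := by
        intro k hk
        by_contra hlt
        exact hl.2 k (by omega) (hhitTrans k hk)
      have hhitn : pvHit ci R C (fun y : Int × Int => y = (r, c)) n := by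
        obtain ⟨x, hxD, hxr⟩ := (pv_reach_symm ci R C hopen n).mp hl.1
        obtain ⟨k, hk, hkl⟩ := pv_exists_lvl ci R C _ hxr
        have hnk : n ≤ k := hge k ⟨x, hxD, hkl⟩
        have hkn : k = n := by omega
        exact hkn ▸ ⟨x, hxD, hkl⟩
      have := hmain.1 n (by omega) hhitn
        (fun k hk1 hk2 hk3 => absurd (hge k hk3) (by omega))
      simpa using this
    · intro hnr
      have hnone : ∀ k, 0 ≤ k → ¬ pvHit ci R C (fun y : Int × Int => y = (r, c)) k := by
        intro k _ hk
        exact hnr ⟨k, hhitTrans k hk⟩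
      have := hmain.2 hnone
      simpa using this

theorem pv_foldl_push {α β : Type} (f : α → β) :
    ∀ (l : List α) (acc : List β),
      l.foldl (fun res x => res ++ [f x]) acc = acc ++ l.map f := by
  intro l
  induction l with
  | nil => intro acc; simp
  | cons a t ih =>
    intro acc
    rw [List.foldl_cons, ih]
    simp

-- ===== VERDICT (by name: the statement is the Claim_ definition above) =====
theorem find_dashmart_distances_spec : Claim_equal_find_dashmart_distances := by
  intro city locations _dom _pre
  unfold Spec_find_dashmart_distances
  unfold find_dashmart_distances find_dashmart_distances_alt
  by_cases hempty : city = [] ∨ city.headD [] = []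
  · rw [if_pos hempty, if_pos hempty]
  · rw [if_neg hempty, if_neg hempty]
    have hfold := pv_foldl_push
      (fun loc : List Int =>
        if 0 ≤ loc.getD 0 0 ∧ loc.getD 0 0 < (city.length : Int) ∧
            0 ≤ loc.getD 1 0 ∧ loc.getD 1 0 < ((city.headD []).length : Int) then
          pvGet2 (pvLoopA city city.length (city.headD []).length
              (city.length * (city.headD []).length)
              (pvInitA city city.length (city.headD []).length).1
              (pvInitA city city.length (city.headD []).length).2)
            (loc.getD 0 0).toNat (loc.getD 1 0).toNat
        else -1) locations []
    rw [hfold]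
    simp only [List.nil_append]
    apply List.map_congr_left
    intro loc _
    have hAans := pv_A_final city city.length (city.headD []).length
    have hBans := pv_nearest_ans city city.length (city.headD []).length
      (loc.getD 0 0) (loc.getD 1 0)
    by_cases hin : 0 ≤ loc.getD 0 0 ∧ loc.getD 0 0 < (city.length : Int) ∧
        0 ≤ loc.getD 1 0 ∧ loc.getD 1 0 < ((city.headD []).length : Int)
    · rw [if_pos hin]
      exact pv_ans_unique city city.length (city.headD []).length
        (loc.getD 0 0, loc.getD 1 0) _ _
        (hAans (loc.getD 0 0, loc.getD 1 0) ⟨hin.1, hin.2.1, hin.2.2.1, hin.2.2.2⟩) hBans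
    · rw [if_neg hin]
      have hB : pvNearest city city.length (city.headD []).length
          (loc.getD 0 0) (loc.getD 1 0) = -1 := by
        unfold pvNearest
        rw [if_pos (Or.inl hin)]
      rw [hB]
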